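-- pv_equiv track=rewrite | github.com/duckdb/duckdb | scripts/merge_grammar_rules_xml.py | can_derive_bare
-- ===== SOURCE A (Python) =====
-- def can_derive_bare(start_nt, target_token, rules, terminals, visited=None):
--     """Check if start_nt can derive to just target_token (possibly via opt_ rules
--     that reduce to empty)."""
--     if visited is None:
--         visited = set()
--     if start_nt in visited:
--         return False
--     visited.add(start_nt)
--     for alt in rules.get(start_nt, []):
--         if not alt:
--             continue
--         # Check if first symbol matches (directly or via nonterminal)
--         first = alt[0]
--         rest = alt[1:]
--         # Can rest all be empty?
--         def all_nullable(syms):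
--             for s in syms:
--                 if s in terminals:
--                     return False
--                 if not any(len(a) == 0 for a in rules.get(s, [[1]])):
--                     return False
--             return True
--
--         if first == target_token and all_nullable(rest):
--             return True
--         if first not in terminals and first in rules:
--             if can_derive_bare(first, target_token, rules, terminals, set(visited)):
--                 if all_nullable(rest):
--                     return True
--     return False
-- ===== SOURCE B (Python) =====
-- def can_derive_bare(start_nt, target_token, rules, terminals, visited=None):
--     """Iterative fixpoint: compute the set of nonterminals reachable from
--     start_nt through alternatives whose tail is nullable, then check whether
--     any reached nonterminal has an alternative that starts with target_token
--     with a nullable tail.  Iterative fixpoint instead of A's path-enumerating DFS."""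
--     blocked = set() if visited is None else set(visited)
--     if start_nt in blocked:
--         return False
--
--     def nullable(s):
--         return s not in terminals and any(len(a) == 0 for a in rules.get(s, [[1]]))
--
--     def tail_nullable(rest):
--         return all(nullable(s) for s in rest)
--
--     reach = {start_nt}
--     while True:
--         new = {alt[0]
--                for nt in reach
--                for alt in rules.get(nt, [])
--                if alt
--                and alt[0] not in terminals
--                and alt[0] in rules
--                and alt[0] not in blocked
--                and tail_nullable(alt[1:])}
--         if new <= reach:
--             break
--         reach |= new
--     return any(alt and alt[0] == target_token and tail_nullable(alt[1:])
--                for nt in reach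
--                for alt in rules.get(nt, []))
-- ===== Notes on version B (the rewrite author's own statement) =====
-- stated objective: alternative
-- what changed: A's recursive DFS copies the visited set at every call and explores simple paths one by one; B instead computes the set of reachable nonterminals once by an iterative fixpoint over the grammar graph and then scans it for an alternative that starts with the target token with a nullable tail.
import Mathlib
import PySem

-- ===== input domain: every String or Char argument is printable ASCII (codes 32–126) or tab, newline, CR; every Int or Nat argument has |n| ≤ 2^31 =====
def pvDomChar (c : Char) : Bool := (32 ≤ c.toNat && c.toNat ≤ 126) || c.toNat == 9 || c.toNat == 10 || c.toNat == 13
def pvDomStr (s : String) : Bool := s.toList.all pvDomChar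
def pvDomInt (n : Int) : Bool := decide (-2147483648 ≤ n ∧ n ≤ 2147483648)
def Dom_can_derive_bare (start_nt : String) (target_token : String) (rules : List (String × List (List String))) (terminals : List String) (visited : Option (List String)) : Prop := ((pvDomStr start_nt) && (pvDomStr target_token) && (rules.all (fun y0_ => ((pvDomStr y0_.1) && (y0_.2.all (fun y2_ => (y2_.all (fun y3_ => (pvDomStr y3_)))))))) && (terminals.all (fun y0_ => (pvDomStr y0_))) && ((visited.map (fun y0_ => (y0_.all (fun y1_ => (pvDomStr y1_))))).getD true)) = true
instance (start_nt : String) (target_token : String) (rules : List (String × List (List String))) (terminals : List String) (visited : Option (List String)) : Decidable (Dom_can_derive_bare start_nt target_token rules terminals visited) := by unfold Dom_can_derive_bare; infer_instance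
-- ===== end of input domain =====

-- B replaces A's recursive path-enumerating DFS (which copies the visited set at every
-- recursive call) by an iterative reachability fixpoint over the grammar graph followed by
-- one acceptance scan; return values agree on every input.  A also mutates a
-- caller-supplied `visited` set in place, B does not — the equivalence proved here is
-- about the RETURN value only.

-- termination helpers for the two ports (cited by name in decreasing_by)
theorem pvFilterLenLe {α : Type} (p q : α → Bool) (l : List α)
    (h : ∀ x ∈ l, p x = true → q x = true) :
    (l.filter p).length ≤ (l.filter q).length := by
  induction l with
  | nil => simp
  | cons a t ih =>
    have ht := ih (fun x hx => h x (List.mem_cons_of_mem a hx))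
    simp only [List.filter_cons]
    by_cases hp : p a = true
    · rw [if_pos hp, if_pos (h a List.mem_cons_self hp)]
      simpa using ht
    · rw [if_neg hp]
      by_cases hq : q a = true
      · rw [if_pos hq]; exact Nat.le_succ_of_le ht
      · rw [if_neg hq]; exact ht

theorem pvFilterLenLt {α : Type} (p q : α → Bool) (l : List α)
    (h : ∀ x ∈ l, p x = true → q x = true) (w : α) (hw : w ∈ l)
    (hq : q w = true) (hp : p w = false) :
    (l.filter p).length < (l.filter q).length := by
  induction l with
  | nil => cases hw
  | cons a t ih =>
    have hmono : ∀ x ∈ t, p x = true → q x = true :=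
      fun x hx => h x (List.mem_cons_of_mem a hx)
    simp only [List.filter_cons]
    rcases List.mem_cons.mp hw with rfl | hwt
    · rw [if_pos hq, if_neg (by simp [hp])]
      exact Nat.lt_succ_of_le (pvFilterLenLe p q t hmono)
    · have ht := ih hmono hwt
      by_cases hpa : p a = true
      · rw [if_pos hpa, if_pos (h a List.mem_cons_self hpa)]
        simpa using ht
      · rw [if_neg hpa]
        by_cases hqa : q a = true
        · rw [if_pos hqa]; exact Nat.lt_succ_of_lt ht
        · rw [if_neg hqa]; exact ht

theorem pvMemAddIff (v : List String) (x y : String) :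
    y ∈ PySem.Set.add v x ↔ y ∈ v ∨ y = x := PySem.Set.mem_add v x y

theorem pvMeasureDec (rules : List (String × List (List String))) (v : List String) (start : String)
    (h1 : ¬ v.contains start = true) (h2 : start ∈ rules.map Prod.fst) :
    ((rules.map Prod.fst).filter (fun k => !((PySem.Set.add v start).contains k))).length <
      ((rules.map Prod.fst).filter (fun k => !(v.contains k))).length := by
  apply pvFilterLenLt _ _ _ ?_ start h2 (by simpa using h1) ?_
  · intro x _ hx
    have hx' : x ∉ PySem.Set.add v start := by simpa [List.contains_eq_mem] using hx
    have hxv : x ∉ v := fun hxv => hx' ((pvMemAddIff v start x).mpr (Or.inl hxv))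
    simpa [List.contains_eq_mem] using hxv
  · have hmem : start ∈ PySem.Set.add v start := (pvMemAddIff v start start).mpr (Or.inr rfl)
    simpa [List.contains_eq_mem] using hmem

theorem pvMemFoldlAddIff (l acc : List String) (x : String) :
    x ∈ l.foldl PySem.Set.add acc ↔ x ∈ acc ∨ x ∈ l := by
  induction l generalizing acc with
  | nil => simp
  | cons a t ih =>
    rw [List.foldl_cons, ih, pvMemAddIff, List.mem_cons]
    tauto

theorem pvMemFoldlAdd (l acc : List String) (x : String) (h : x ∈ acc ∨ x ∈ l) :
    x ∈ l.foldl PySem.Set.add acc := (pvMemFoldlAddIff l acc x).mpr h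

-- ===== PORT A =====
-- rules.get(k) on the dict (first match; tester inputs have unique keys)
def pvGetA (rules : List (String × List (List String))) (k : String) : Option (List (List String)) :=
  (rules.find? (fun p => p.1 == k)).map (fun p => p.2)

-- A's inner all_nullable: the default [[1]] of rules.get(s, [[1]]) contains no empty
-- alternative, hence the `none` branch is false (hand-ported, exact)
def pvAllNullableA (rules : List (String × List (List String))) (terminals : List String) (syms : List String) : Bool :=
  syms.all (fun s =>
    !(terminals.contains s) &&
    (match pvGetA rules s with
     | some alts => alts.any (fun a => a.isEmpty)
     | none => false))

theorem pvKeyOfGetA (rules : List (String × List (List String))) (k : String)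
    (h : (pvGetA rules k).isSome = true) : k ∈ rules.map Prod.fst := by
  rcases hf : rules.find? (fun p => p.1 == k) with _ | p
  · simp [pvGetA, hf] at h
  · have hm := List.mem_of_find?_eq_some hf
    have hp : p.1 = k := by simpa using List.find?_some hf
    exact List.mem_map.mpr ⟨p, hm, hp⟩

theorem pvKeyOfMemGetD (rules : List (String × List (List String))) (k : String)
    (alt : List String) (h : alt ∈ (pvGetA rules k).getD []) : k ∈ rules.map Prod.fst := by
  apply pvKeyOfGetA
  rcases hg : pvGetA rules k with _ | alts
  · rw [hg] at h; cases h
  · rfl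

-- the recursive body of A; `v` is the (copied) visited set of the Python code
def pvDfsA (target : String) (rules : List (String × List (List String))) (terminals : List String) (start : String) (v : List String) : Bool :=
  if v.contains start then false
  else
    ((pvGetA rules start).getD []).attach.any (fun x =>
      match x with
      | ⟨[], _⟩ => false
      | ⟨first :: rest, _⟩ =>
        (first == target && pvAllNullableA rules terminals rest) ||
        (!(terminals.contains first) && (pvGetA rules first).isSome &&
         pvDfsA target rules terminals first (PySem.Set.add v start) &&
         pvAllNullableA rules terminals rest))
termination_by ((rules.map Prod.fst).filter (fun k => !(v.contains k))).length
decreasing_by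
  exact pvMeasureDec rules v start (by assumption) (pvKeyOfMemGetD rules start _ (by assumption))

def can_derive_bare (start_nt : String) (target_token : String) (rules : List (String × List (List String))) (terminals : List String) (visited : Option (List String)) : Bool :=
  pvDfsA target_token rules terminals start_nt (visited.getD [])

-- ===== PORT B =====
def pvGetB (rules : List (String × List (List String))) (k : String) : Option (List (List String)) :=
  (rules.find? (fun p => p.1 == k)).map (fun p => p.2)

def pvNullB (rules : List (String × List (List String))) (terminals : List String) (s : String) : Bool :=
  !(terminals.contains s) &&
  (match pvGetB rules s with
   | some alts => alts.any (fun a => a.isEmpty)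
   | none => false)

def pvTailNullB (rules : List (String × List (List String))) (terminals : List String) (syms : List String) : Bool :=
  syms.all (pvNullB rules terminals)

-- one round of B's set comprehension: successors of the current reach set
def pvStepB (rules : List (String × List (List String))) (terminals : List String) (blocked : List String) (reach : List String) : List String :=
  reach.flatMap (fun nt => ((pvGetB rules nt).getD []).filterMap (fun alt =>
    match alt with
    | [] => none
    | f :: rest =>
      if !(terminals.contains f) && (pvGetB rules f).isSome && !(blocked.contains f) &&
         pvTailNullB rules terminals rest then some f else none))

theorem pvStepBKey (rules : List (String × List (List String))) (terminals blocked reach : List String)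
    (f : String) (h : f ∈ pvStepB rules terminals blocked reach) : f ∈ rules.map Prod.fst := by
  simp only [pvStepB, List.mem_flatMap, List.mem_filterMap] at h
  rcases h with ⟨nt, _, alt, _, halt⟩
  rcases alt with _ | ⟨g, rest⟩
  · simp at halt
  · simp only [] at halt
    split at halt
    · rename_i hcond
      cases halt
      have : (pvGetB rules f).isSome = true := by
        simp only [Bool.and_eq_true] at hcond
        exact hcond.1.1.2
      exact pvKeyOfGetA rules f this
    · cases halt

-- B's `while True` fixpoint loop
def pvSaturateB (rules : List (String × List (List String))) (terminals : List String) (blocked : List String) (reach : List String) : List String :=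
  let nw := pvStepB rules terminals blocked reach
  if nw.all (fun y => reach.contains y) then reach
  else pvSaturateB rules terminals blocked (nw.foldl PySem.Set.add reach)
termination_by ((rules.map Prod.fst).filter (fun k => !(reach.contains k))).length
decreasing_by
  rename_i hall
  simp only [List.all_eq_true, not_forall] at hall
  obtain ⟨f, hfnw, hfr⟩ := hall
  apply pvFilterLenLt _ _ _ ?_ f (pvStepBKey rules terminals blocked reach f hfnw) ?_ ?_
  · intro x _ hx
    simp only [Bool.not_eq_eq_eq_not, Bool.not_true, List.contains_eq_mem,
      decide_eq_false_iff_not] at hx ⊢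
    exact fun hxv => hx (pvMemFoldlAdd _ _ _ (Or.inl hxv))
  · simpa using hfr
  · simp only [Bool.not_eq_false', List.contains_eq_mem, decide_eq_true_eq]
    exact pvMemFoldlAdd _ _ _ (Or.inr hfnw)

def can_derive_bare_alt (start_nt : String) (target_token : String) (rules : List (String × List (List String))) (terminals : List String) (visited : Option (List String)) : Bool :=
  let blocked := visited.getD []
  if blocked.contains start_nt then false
  else
    let reach := pvSaturateB rules terminals blocked [start_nt]
    reach.any (fun nt => ((pvGetB rules nt).getD []).any (fun alt =>
      match alt with
      | [] => false
      | f :: rest => f == target_token && pvTailNullB rules terminals rest))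

-- ===== PRECONDITION & SPEC =====
def Spec_can_derive_bare (start_nt : String) (target_token : String) (rules : List (String × List (List String))) (terminals : List String) (visited : Option (List String)) (out : Bool) : Prop := out = can_derive_bare_alt start_nt target_token rules terminals visited
instance (start_nt : String) (target_token : String) (rules : List (String × List (List String))) (terminals : List String) (visited : Option (List String)) (out : Bool) : Decidable (Spec_can_derive_bare start_nt target_token rules terminals visited out) := by unfold Spec_can_derive_bare; infer_instance

-- ===== CLAIM (what is proved, stated in full; the proofs are below) =====
def Claim_equal_can_derive_bare : Prop := ∀ (start_nt : String) (target_token : String) (rules : List (String × List (List String))) (terminals : List String) (visited : Option (List String)), Dom_can_derive_bare start_nt target_token rules terminals visited → Spec_can_derive_bare start_nt target_token rules terminals visited (can_derive_bare start_nt target_token rules terminals visited)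

-- ===== LEMMAS AND PROOFS =====

-- B's helpers are definitionally A's
theorem pvGetB_eq : pvGetB = pvGetA := rfl
theorem pvTailNullB_eq : pvTailNullB = pvAllNullableA := rfl

-- an alternative of x that accepts the target directly
def AccP (target : String) (rules : List (String × List (List String))) (terminals : List String) (x : String) : Prop :=
  ∃ alt ∈ (pvGetA rules x).getD [], ∃ rest, alt = target :: rest ∧ pvAllNullableA rules terminals rest = true

-- a one-step edge of the grammar graph followed by both programs
def EdgeP (rules : List (String × List (List String))) (terminals : List String) (x y : String) : Prop :=
  ∃ alt ∈ (pvGetA rules x).getD [], ∃ rest, alt = y :: rest ∧ terminals.contains y = false ∧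
    (pvGetA rules y).isSome = true ∧ pvAllNullableA rules terminals rest = true

-- derivability as A's recursion sees it: the avoided set grows along the path
inductive DerA (target : String) (rules : List (String × List (List String))) (terminals : List String) : List String → String → Prop
  | found (v : List String) (x : String) : x ∉ v → AccP target rules terminals x → DerA target rules terminals v x
  | step (v : List String) (x y : String) : x ∉ v → EdgeP rules terminals x y →
      DerA target rules terminals (PySem.Set.add v x) y → DerA target rules terminals v x

-- derivability with a fixed avoided set (what B computes)
inductive DerB (target : String) (rules : List (String × List (List String))) (terminals : List String) (blocked : List String) : String → Prop
  | found (x : String) : x ∉ blocked → AccP target rules terminals x → DerB target rules terminals blocked x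
  | step (x y : String) : x ∉ blocked → EdgeP rules terminals x y →
      DerB target rules terminals blocked y → DerB target rules terminals blocked x

-- reachability from the start symbol avoiding blocked
inductive Rch (rules : List (String × List (List String))) (terminals : List String) (blocked : List String) (start : String) : String → Prop
  | base : Rch rules terminals blocked start start
  | step (x y : String) : Rch rules terminals blocked start x → EdgeP rules terminals x y →
      y ∉ blocked → Rch rules terminals blocked start y

theorem derA_unfold_iff (target : String) (rules : List (String × List (List String))) (terminals : List String)
    (v : List String) (x : String) :
    DerA target rules terminals v x ↔ x ∉ v ∧ (AccP target rules terminals x ∨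
      ∃ y, EdgeP rules terminals x y ∧ DerA target rules terminals (PySem.Set.add v x) y) := by
  constructor
  · intro h
    cases h with
    | found _ _ hx hacc => exact ⟨hx, Or.inl hacc⟩
    | step _ _ y hx he hd => exact ⟨hx, Or.inr ⟨y, he, hd⟩⟩
  · rintro ⟨hx, hacc | ⟨y, he, hd⟩⟩
    · exact DerA.found _ _ hx hacc
    · exact DerA.step _ _ _ hx he hd

theorem dfsA_body_iff (target : String) (rules : List (String × List (List String))) (terminals : List String)
    (start : String) (v : List String) (hns : ¬ v.contains start = true) :
    pvDfsA target rules terminals start v = true ↔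
      (AccP target rules terminals start ∨
        ∃ y, EdgeP rules terminals start y ∧
          pvDfsA target rules terminals y (PySem.Set.add v start) = true) := by
  rw [pvDfsA, if_neg hns, List.any_eq_true]
  constructor
  · rintro ⟨⟨alt, halt⟩, _, hP⟩
    rcases alt with _ | ⟨first, rest⟩
    · simp at hP
    · have hP' : ((first == target && pvAllNullableA rules terminals rest) ||
        (!(terminals.contains first) && (pvGetA rules first).isSome &&
         pvDfsA target rules terminals first (PySem.Set.add v start) &&
         pvAllNullableA rules terminals rest)) = true := hP
      simp only [Bool.or_eq_true, Bool.and_eq_true, beq_iff_eq, Bool.not_eq_true'] at hP'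
      rcases hP' with ⟨hfeq, htail⟩ | ⟨⟨⟨hterm, hsome⟩, hrec⟩, htail⟩
      · exact Or.inl ⟨first :: rest, halt, rest, by rw [hfeq], htail⟩
      · exact Or.inr ⟨first, ⟨first :: rest, halt, rest, rfl, hterm, hsome, htail⟩, hrec⟩
  · intro h
    rcases h with ⟨alt, halt, rest, rfl, htail⟩ | ⟨y, ⟨alt, halt, rest, rfl, hterm, hsome, htail⟩, hrec⟩
    · refine ⟨⟨target :: rest, halt⟩, List.mem_attach _ _, ?_⟩
      show ((target == target && pvAllNullableA rules terminals rest) || _) = true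
      simp [htail]
    · refine ⟨⟨y :: rest, halt⟩, List.mem_attach _ _, ?_⟩
      show ((y == target && pvAllNullableA rules terminals rest) ||
        (!(terminals.contains y) && (pvGetA rules y).isSome &&
         pvDfsA target rules terminals y (PySem.Set.add v start) &&
         pvAllNullableA rules terminals rest)) = true
      have ht' : y ∉ terminals := by simpa [List.contains_eq_mem] using hterm
      simp [hsome, htail, hrec, ht']

theorem dfsA_main (target : String) (rules : List (String × List (List String))) (terminals : List String)
    (v : List String) (start : String)
    (ih : ∀ (v' : List String) (s' : String),
      ((rules.map Prod.fst).filter (fun k => !(v'.contains k))).length <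
        ((rules.map Prod.fst).filter (fun k => !(v.contains k))).length →
      (pvDfsA target rules terminals s' v' = true ↔ DerA target rules terminals v' s')) :
    pvDfsA target rules terminals start v = true ↔ DerA target rules terminals v start := by
  by_cases hsv : v.contains start = true
  · rw [pvDfsA, if_pos hsv]
    constructor
    · intro h; cases h
    · intro h
      exact absurd ((derA_unfold_iff target rules terminals v start).mp h).1
        (by simpa [List.contains_eq_mem] using hsv)
  · rw [dfsA_body_iff target rules terminals start v hsv,
      derA_unfold_iff target rules terminals v start]
    have hs : start ∉ v := by simpa [List.contains_eq_mem] using hsv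
    constructor
    · rintro (hacc | ⟨y, he, hrec⟩)
      · exact ⟨hs, Or.inl hacc⟩
      · obtain ⟨alt, halt, -⟩ := id he
        have hdec := pvMeasureDec rules v start hsv (pvKeyOfMemGetD rules start alt halt)
        exact ⟨hs, Or.inr ⟨y, he, (ih _ y hdec).mp hrec⟩⟩
    · rintro ⟨-, hacc | ⟨y, he, hd⟩⟩
      · exact Or.inl hacc
      · obtain ⟨alt, halt, -⟩ := id he
        have hdec := pvMeasureDec rules v start hsv (pvKeyOfMemGetD rules start alt halt)
        exact Or.inr ⟨y, he, (ih _ y hdec).mpr hd⟩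

theorem dfsA_iff (target : String) (rules : List (String × List (List String))) (terminals : List String)
    (v : List String) (start : String) :
    pvDfsA target rules terminals start v = true ↔ DerA target rules terminals v start := by
  suffices h : ∀ (n : ℕ) (v : List String) (start : String),
      ((rules.map Prod.fst).filter (fun k => !(v.contains k))).length ≤ n →
      (pvDfsA target rules terminals start v = true ↔ DerA target rules terminals v start) from
    h _ v start le_rfl
  intro n
  induction n with
  | zero =>
    intro v start hm
    exact dfsA_main target rules terminals v start
      (fun v' s' hlt => absurd (lt_of_lt_of_le hlt hm) (Nat.not_lt_zero _))
  | succ n ihn =>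
    intro v start hm
    exact dfsA_main target rules terminals v start
      (fun v' s' hlt => ihn v' s' (by omega))

theorem derA_congr (target : String) (rules : List (String × List (List String))) (terminals : List String)
    (v v' : List String) (x : String) (hvv : ∀ a, a ∈ v ↔ a ∈ v')
    (h : DerA target rules terminals v x) : DerA target rules terminals v' x := by
  induction h generalizing v' with
  | found w z hz hacc => exact DerA.found v' z (fun hm => hz ((hvv z).mpr hm)) hacc
  | step w z y hz he _ ih =>
    refine DerA.step v' z y (fun hm => hz ((hvv z).mpr hm)) he (ih _ ?_)
    intro a
    rw [pvMemAddIff, pvMemAddIff]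
    exact or_congr (hvv a) Iff.rfl

theorem derA_anti (target : String) (rules : List (String × List (List String))) (terminals : List String)
    (w v : List String) (x : String) (hvw : ∀ a, a ∈ v → a ∈ w)
    (h : DerA target rules terminals w x) : DerA target rules terminals v x := by
  induction h generalizing v with
  | found u z hz hacc => exact DerA.found v z (fun hm => hz (hvw _ hm)) hacc
  | step u z y hz he _ ih =>
    refine DerA.step v z y (fun hm => hz (hvw _ hm)) he (ih _ ?_)
    intro a ha
    rw [pvMemAddIff] at ha ⊢
    exact ha.imp_left (hvw a)

theorem derB_anti (target : String) (rules : List (String × List (List String))) (terminals : List String)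
    (w v : List String) (x : String) (hvw : ∀ a, a ∈ v → a ∈ w)
    (h : DerB target rules terminals w x) : DerB target rules terminals v x := by
  induction h with
  | found z hz hacc => exact DerB.found z (fun hm => hz (hvw z hm)) hacc
  | step z y hz he _ ih => exact DerB.step z y (fun hm => hz (hvw z hm)) he ih

theorem derA_to_derB (target : String) (rules : List (String × List (List String))) (terminals : List String)
    (v : List String) (x : String) (h : DerA target rules terminals v x) : DerB target rules terminals v x := by
  induction h with
  | found w z hz hacc => exact DerB.found z hz hacc
  | step w z y hz he _ ih =>
    exact DerB.step z y hz he
      (derB_anti target rules terminals _ w y (fun a ha => (pvMemAddIff w z a).mpr (Or.inl ha)) ih)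

theorem derA_extend (target : String) (rules : List (String × List (List String))) (terminals : List String)
    (x : String) (v : List String) (y : String) (h : DerA target rules terminals v y) (hx : x ∉ v) :
    DerA target rules terminals (PySem.Set.add v x) y ∨ DerA target rules terminals v x := by
  revert hx
  induction h with
  | found w z hz hacc =>
    intro hx
    by_cases hzx : z = x
    · exact Or.inr (hzx ▸ DerA.found w z hz hacc)
    · exact Or.inl (DerA.found _ z (fun hm => ((pvMemAddIff w x z).mp hm).elim hz hzx) hacc)
  | step w z y hz he hder ih =>
    intro hx
    by_cases hzx : z = x
    · exact Or.inr (hzx ▸ DerA.step w z y hz he hder)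
    · have hxw : x ∉ PySem.Set.add w z :=
        fun hm => ((pvMemAddIff w z x).mp hm).elim hx (fun e => hzx e.symm)
      rcases ih hxw with hL | hR
      · refine Or.inl (DerA.step _ z y
          (fun hm => ((pvMemAddIff w x z).mp hm).elim hz hzx) he
          (derA_congr target rules terminals _ _ y ?_ hL))
        intro a
        rw [pvMemAddIff, pvMemAddIff, pvMemAddIff, pvMemAddIff]
        tauto
      · exact Or.inr (derA_anti target rules terminals _ w x
          (fun a ha => (pvMemAddIff w z a).mpr (Or.inl ha)) hR)

theorem derB_to_derA (target : String) (rules : List (String × List (List String))) (terminals : List String)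
    (v : List String) (x : String) (h : DerB target rules terminals v x) : DerA target rules terminals v x := by
  induction h with
  | found z hz hacc => exact DerA.found v z hz hacc
  | step z y hz he _ ih =>
    rcases derA_extend target rules terminals z v y ih hz with hL | hR
    · exact DerA.step v z y hz he hL
    · exact hR

theorem mem_stepB_iff (rules : List (String × List (List String))) (terminals blocked reach : List String) (f : String) :
    f ∈ pvStepB rules terminals blocked reach ↔
      ∃ nt ∈ reach, EdgeP rules terminals nt f ∧ f ∉ blocked := by
  constructor
  · intro h
    simp only [pvStepB, List.mem_flatMap, List.mem_filterMap] at h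
    obtain ⟨nt, hnt, alt, halt, heq⟩ := h
    rcases alt with _ | ⟨g, rest⟩
    · simp at heq
    · simp only [] at heq
      split at heq
      · rename_i hcond
        have hgf : g = f := Option.some.inj heq
        subst hgf
        simp only [Bool.and_eq_true, Bool.not_eq_true'] at hcond
        obtain ⟨⟨⟨hterm, hsome⟩, hblocked⟩, htail⟩ := hcond
        refine ⟨nt, hnt, ⟨g :: rest, halt, rest, rfl, hterm, hsome, htail⟩, ?_⟩
        simpa [List.contains_eq_mem] using hblocked
      · cases heq
  · rintro ⟨nt, hnt, ⟨alt, halt, rest, rfl, hterm, hsome, htail⟩, hfb⟩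
    simp only [pvStepB, List.mem_flatMap, List.mem_filterMap]
    refine ⟨nt, hnt, f :: rest, halt, ?_⟩
    have ht' : f ∉ terminals := by simpa [List.contains_eq_mem] using hterm
    simp [pvGetB_eq, pvTailNullB_eq, hsome, htail, ht', hfb]

theorem pvSaturateB_eq (rules : List (String × List (List String))) (terminals blocked reach : List String) :
    pvSaturateB rules terminals blocked reach =
      if (pvStepB rules terminals blocked reach).all (fun y => reach.contains y) then reach
      else pvSaturateB rules terminals blocked
        ((pvStepB rules terminals blocked reach).foldl PySem.Set.add reach) := by
  rw [pvSaturateB]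

theorem satB_supset (rules : List (String × List (List String))) (terminals blocked reach : List String)
    (x : String) (hx : x ∈ reach) : x ∈ pvSaturateB rules terminals blocked reach := by
  induction reach using pvSaturateB.induct rules terminals blocked with
  | case1 reach nw hall =>
    have h : ((pvStepB rules terminals blocked reach).all fun y => reach.contains y) = true := hall
    rw [pvSaturateB_eq, if_pos h]; exact hx
  | case2 reach nw hall ih =>
    have h : ¬ ((pvStepB rules terminals blocked reach).all fun y => reach.contains y) = true := hall
    rw [pvSaturateB_eq, if_neg h]
    exact ih (pvMemFoldlAdd _ _ _ (Or.inl hx))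

theorem satB_closed (rules : List (String × List (List String))) (terminals blocked reach : List String)
    (f : String) (hf : f ∈ pvStepB rules terminals blocked (pvSaturateB rules terminals blocked reach)) :
    f ∈ pvSaturateB rules terminals blocked reach := by
  induction reach using pvSaturateB.induct rules terminals blocked with
  | case1 reach nw hall =>
    have h : ((pvStepB rules terminals blocked reach).all fun y => reach.contains y) = true := hall
    rw [pvSaturateB_eq, if_pos h] at hf ⊢
    have := List.all_eq_true.mp h f hf
    simpa [List.contains_eq_mem] using this
  | case2 reach nw hall ih =>
    have h : ¬ ((pvStepB rules terminals blocked reach).all fun y => reach.contains y) = true := hall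
    rw [pvSaturateB_eq, if_neg h] at hf ⊢
    exact ih hf

theorem satB_sound (rules : List (String × List (List String))) (terminals blocked : List String)
    (start : String) (reach : List String)
    (hinv : ∀ x ∈ reach, Rch rules terminals blocked start x) :
    ∀ x ∈ pvSaturateB rules terminals blocked reach, Rch rules terminals blocked start x := by
  induction reach using pvSaturateB.induct rules terminals blocked with
  | case1 reach nw hall =>
    have h : ((pvStepB rules terminals blocked reach).all fun y => reach.contains y) = true := hall
    rw [pvSaturateB_eq, if_pos h]
    exact hinv
  | case2 reach nw hall ih =>
    have h : ¬ ((pvStepB rules terminals blocked reach).all fun y => reach.contains y) = true := hall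
    rw [pvSaturateB_eq, if_neg h]
    apply ih
    intro x hx
    rcases (pvMemFoldlAddIff _ _ _).mp hx with hx | hx
    · exact hinv x hx
    · obtain ⟨nt, hnt, he, hb⟩ := (mem_stepB_iff rules terminals blocked reach x).mp hx
      exact Rch.step nt x (hinv nt hnt) he hb

theorem satB_complete (rules : List (String × List (List String))) (terminals blocked : List String)
    (start : String) (x : String) (h : Rch rules terminals blocked start x) :
    x ∈ pvSaturateB rules terminals blocked [start] := by
  induction h with
  | base => exact satB_supset rules terminals blocked [start] start (by simp)
  | step w y _ he hyb ih =>
    exact satB_closed rules terminals blocked [start] y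
      ((mem_stepB_iff rules terminals blocked _ y).mpr ⟨w, ih, he, hyb⟩)

theorem rch_not_blocked (rules : List (String × List (List String))) (terminals blocked : List String)
    (start : String) (hs : start ∉ blocked) (x : String) (h : Rch rules terminals blocked start x) :
    x ∉ blocked := by
  induction h with
  | base => exact hs
  | step _ _ _ _ hyb => exact hyb

theorem derB_notmem (target : String) (rules : List (String × List (List String))) (terminals blocked : List String)
    (x : String) (h : DerB target rules terminals blocked x) : x ∉ blocked := by
  cases h with
  | found _ hx _ => exact hx
  | step _ _ hx _ _ => exact hx

theorem derB_iff_rch (target : String) (rules : List (String × List (List String))) (terminals blocked : List String)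
    (start : String) (hs : start ∉ blocked) :
    DerB target rules terminals blocked start ↔
      ∃ x, Rch rules terminals blocked start x ∧ AccP target rules terminals x := by
  constructor
  · intro h
    have aux : ∀ z, DerB target rules terminals blocked z →
        Rch rules terminals blocked start z →
        ∃ x, Rch rules terminals blocked start x ∧ AccP target rules terminals x := by
      intro z hz
      induction hz with
      | found w hw hacc => exact fun hr => ⟨w, hr, hacc⟩
      | step w y _ he hder ih =>
        exact fun hr => ih (Rch.step w y hr he (derB_notmem target rules terminals blocked y hder))
    exact aux start h Rch.base
  · rintro ⟨x, hr, hacc⟩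
    have aux2 : ∀ z, Rch rules terminals blocked start z →
        DerB target rules terminals blocked z → DerB target rules terminals blocked start := by
      intro z hz
      induction hz with
      | base => exact id
      | step w y hw he _ ih =>
        exact fun hy => ih (DerB.step w y (rch_not_blocked rules terminals blocked start hs w hw) he hy)
    exact aux2 x hr (DerB.found x (rch_not_blocked rules terminals blocked start hs x hr) hacc)

theorem accB_iff (target : String) (rules : List (String × List (List String))) (terminals : List String) (nt : String) :
    (((pvGetB rules nt).getD []).any (fun alt =>
      match alt with
      | [] => false
      | f :: rest => f == target && pvTailNullB rules terminals rest)) = true ↔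
      AccP target rules terminals nt := by
  rw [List.any_eq_true]
  constructor
  · rintro ⟨alt, halt, hP⟩
    rcases alt with _ | ⟨f, rest⟩
    · simp at hP
    · have hP' : (f == target && pvTailNullB rules terminals rest) = true := hP
      simp only [Bool.and_eq_true, beq_iff_eq] at hP'
      exact ⟨f :: rest, halt, rest, by rw [hP'.1], by rw [← pvTailNullB_eq]; exact hP'.2⟩
  · rintro ⟨alt, halt, rest, rfl, htail⟩
    refine ⟨target :: rest, halt, ?_⟩
    show (target == target && pvTailNullB rules terminals rest) = true
    simp [pvTailNullB_eq, htail]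

theorem altB_iff (start target : String) (rules : List (String × List (List String))) (terminals : List String)
    (visited : Option (List String)) :
    can_derive_bare_alt start target rules terminals visited = true ↔
      DerB target rules terminals (visited.getD []) start := by
  unfold can_derive_bare_alt
  simp only []
  by_cases hsb : (visited.getD []).contains start = true
  · rw [if_pos hsb]
    constructor
    · intro h; cases h
    · intro h
      exact absurd (derB_notmem target rules terminals _ start h)
        (by simpa [List.contains_eq_mem] using hsb)
  · rw [if_neg hsb]
    have hs : start ∉ visited.getD [] := by simpa [List.contains_eq_mem] using hsb
    rw [derB_iff_rch target rules terminals _ start hs, List.any_eq_true]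
    constructor
    · rintro ⟨nt, hnt, hacc⟩
      refine ⟨nt, satB_sound rules terminals _ start [start] ?_ nt hnt,
        (accB_iff target rules terminals nt).mp hacc⟩
      intro x hx
      rw [List.mem_singleton] at hx
      subst hx
      exact Rch.base
    · rintro ⟨x, hr, hacc⟩
      exact ⟨x, satB_complete rules terminals _ start x hr,
        (accB_iff target rules terminals x).mpr hacc⟩

-- ===== VERDICT (by name: the statement is the Claim_ definition above) =====
theorem can_derive_bare_spec : Claim_equal_can_derive_bare := by
  intro start target rules terminals visited _
  unfold Spec_can_derive_bare
  have h : can_derive_bare start target rules terminals visited = true ↔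
      can_derive_bare_alt start target rules terminals visited = true := by
    rw [altB_iff, show can_derive_bare start target rules terminals visited =
      pvDfsA target rules terminals start (visited.getD []) from rfl, dfsA_iff]
    exact ⟨derA_to_derB _ _ _ _ _, derB_to_derA _ _ _ _ _⟩
  rcases hb : can_derive_bare_alt start target rules terminals visited with _ | _
  · rcases ha : can_derive_bare start target rules terminals visited with _ | _
    · rfl
    · exact absurd (h.mp ha) (by simp [hb])
  · exact h.mpr hb
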